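-- pv_equiv track=rewrite | github.com/wzygxr/shuati | class101_DynamicProgrammingAndGreedyAlgorithms/Code01_BuyMonster.py | compute3
-- ===== SOURCE A (Python) =====
-- from typing import List, Tuple
-- import math
--
-- def compute3(n: int, a: List[int], b: List[int]) -> int:
--     """
--     方法3: 基于能力值的动态规划
--     适用于a[i]数值范围不大的情况
--
--     算法思路:
--     1. dp[i][j]表示能力正好是j，并且确保能通过前i个怪兽，需要至少花多少钱
--     2. 如果dp[i][j] == math.inf，表示无法达到
--     3. 状态转移考虑两种情况：贿赂或不贿赂当前怪兽
--
--     时间复杂度: O(n × ∑a[i])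
--     空间复杂度: O(∑a[i])
--     """
--     # 输入验证
--     if n <= 0 or len(a) < n + 1 or len(b) < n + 1:
--         return -1
--
--     total_ability = sum(a[1:n+1])
--
--     # 初始化DP数组
--     dp: List[List[float]] = [[math.inf] * (total_ability + 1) for _ in range(n + 1)]
--
--     # 初始化边界条件
--     for j in range(total_ability + 1):
--         dp[0][j] = math.inf
--     dp[0][0] = 0  # 能力为0时，花费0金钱（处理0个怪兽）
--
--     for i in range(1, n + 1):
--         for j in range(total_ability + 1):
--             dp[i][j] = math.inf
--
--             # 情况1: 不贿赂当前怪兽（需要能力足够且前i-1个怪兽能通过）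
--             if j >= a[i] and dp[i-1][j] != math.inf:
--                 dp[i][j] = min(dp[i][j], dp[i-1][j])
--
--             # 情况2: 贿赂当前怪兽（需要能力足够且前i-1个怪兽能通过）
--             if j - a[i] >= 0 and dp[i-1][j - a[i]] != math.inf:
--                 dp[i][j] = min(dp[i][j], dp[i-1][j - a[i]] + b[i])
--
--     # 找到通过所有怪兽的最小花费
--     result = math.inf
--     for j in range(total_ability + 1):
--         result = min(result, dp[n][j])
--
--     return -1 if result == math.inf else int(result)
-- ===== SOURCE B (Python) =====
-- from typing import List
--
-- def compute3(n: int, a: List[int], b: List[int]) -> int: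
--     # Dual DP over money instead of ability: best maps each reachable total
--     # bribe cost to the maximum ability attainable at exactly that cost; the
--     # answer is the smallest reachable cost after all monsters.
--     if n <= 0 or len(a) < n + 1 or len(b) < n + 1:
--         return -1
--     best = {0: 0}  # cost -> max ability after the monsters processed so far
--     for i in range(1, n + 1):
--         ai, bi = a[i], b[i]
--         nxt = {}
--         for c, v in best.items():
--             if v >= ai and (c not in nxt or nxt[c] < v):
--                 nxt[c] = v  # pass without bribing: ability suffices
--             nc, nv = c + bi, v + ai
--             if nc not in nxt or nxt[nc] < nv:
--                 nxt[nc] = nv  # bribe monster i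
--         best = nxt
--     return min(best) if best else -1
-- ===== Notes on version B (the rewrite author's own statement) =====
-- stated objective: alternative
-- what changed: Replaces A's ability-indexed DP table dp[i][j] = min cost to pass the first i monsters with ability exactly j by the dual money-keyed DP: a dict mapping each reachable exact bribe cost to the maximum ability attainable at that cost, advanced per monster over the dict's entries; the answer is the smallest reachable cost (min over dict keys) instead of the min over the final DP row.
-- outside the precondition, e.g. on compute3(1, [0, -2], [0, 3]): A raises IndexError, B returns 0
import Mathlib
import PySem

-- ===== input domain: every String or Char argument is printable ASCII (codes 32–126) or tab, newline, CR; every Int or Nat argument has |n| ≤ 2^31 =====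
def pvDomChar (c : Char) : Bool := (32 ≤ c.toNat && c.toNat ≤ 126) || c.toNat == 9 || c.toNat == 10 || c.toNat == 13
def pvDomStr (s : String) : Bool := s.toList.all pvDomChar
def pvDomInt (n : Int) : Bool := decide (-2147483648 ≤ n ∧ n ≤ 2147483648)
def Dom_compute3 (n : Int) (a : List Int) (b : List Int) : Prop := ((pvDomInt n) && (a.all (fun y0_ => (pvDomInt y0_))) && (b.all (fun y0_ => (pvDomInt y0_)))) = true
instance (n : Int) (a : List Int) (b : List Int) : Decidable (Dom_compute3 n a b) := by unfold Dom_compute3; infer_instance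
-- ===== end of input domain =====

-- B replaces A's ability-indexed DP (min cost for each exact ability) by the dual
-- money-keyed DP (a dict from reachable exact cost to max attainable ability);
-- objective: alternative algorithm, same asymptotic cost class.

-- ===== PORT A =====
-- Python's math.inf sentinel is ported as `none`; min with inf:
def pyMinInf : Option Int → Option Int → Option Int
  | none, y => y
  | some x, none => some x
  | some x, some y => some (min x y)

-- the body of A's inner loop: dp[i][j] computed from row i-1 (= prev)
def a3Cell (prev : List (Option Int)) (ai bi j : Int) : Option Int :=
  let d0 : Option Int := none
  let d1 := if j ≥ ai ∧ PySem.List.pyGetD prev j none ≠ none then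
              pyMinInf d0 (PySem.List.pyGetD prev j none) else d0
  if j - ai ≥ 0 ∧ PySem.List.pyGetD prev (j - ai) none ≠ none then
    pyMinInf d1 ((PySem.List.pyGetD prev (j - ai) none).map (· + bi)) else d1

def compute3 (n : Int) (a : List Int) (b : List Int) : Int :=
  if n ≤ 0 ∨ (a.length : Int) < n + 1 ∨ (b.length : Int) < n + 1 then -1
  else
    let total := (PySem.List.slice a (some 1) (some (n + 1))).sum
    -- dp[0][j] = inf for all j, then dp[0][0] = 0
    let row0 : List (Option Int) :=
      (PySem.List.pyRange 0 (total + 1) 1).map (fun j => if j = 0 then some 0 else none)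
    -- for i in range(1, n+1): for j in range(total+1): dp[i][j] = …
    let rowN := (PySem.List.pyRange 1 (n + 1) 1).foldl (fun prev i =>
      (PySem.List.pyRange 0 (total + 1) 1).map
        (a3Cell prev (PySem.List.pyGetD a i 0) (PySem.List.pyGetD b i 0))) row0
    -- result = inf; for j in range(total+1): result = min(result, dp[n][j])
    let result := (PySem.List.pyRange 0 (total + 1) 1).foldl
      (fun r j => pyMinInf r (PySem.List.pyGetD rowN j none)) none
    match result with
    | none => -1
    | some r => r

-- ===== PORT B =====
-- 'if key not in nxt or nxt[key] < v: nxt[key] = v' (keep the larger value)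
def tryMax (nxt : PySem.Dict Int Int) (c v : Int) : PySem.Dict Int Int :=
  match nxt.get? c with
  | none => nxt.insert c v
  | some w => if w < v then nxt.insert c v else nxt

-- one monster: fold over best.items() building the next cost→max-ability dict
def bStep (ai bi : Int) (best : PySem.Dict Int Int) : PySem.Dict Int Int :=
  best.items.foldl (fun nxt cv =>
    let nxt1 := if ai ≤ cv.2 then tryMax nxt cv.1 cv.2 else nxt
    tryMax nxt1 (cv.1 + bi) (cv.2 + ai)) PySem.Dict.empty

def compute3_alt (n : Int) (a : List Int) (b : List Int) : Int :=
  if n ≤ 0 ∨ (a.length : Int) < n + 1 ∨ (b.length : Int) < n + 1 then -1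
  else
    let bestN := (PySem.List.pyRange 1 (n + 1) 1).foldl (fun best i =>
      bStep (PySem.List.pyGetD a i 0) (PySem.List.pyGetD b i 0) best)
      (PySem.Dict.empty.insert 0 0)
    match PySem.List.min? bestN.keys (fun x => x) with
    | some m => m
    | none => -1

-- ===== PRECONDITION & SPEC =====
-- Pre_ excludes only inputs where A raises IndexError: past the validation guard, a negative
-- ability a[i] (i in 1..n) makes A index dp[i-1] beyond total_ability.
def Pre_compute3 (n : Int) (a : List Int) (b : List Int) : Prop :=
  (n ≤ 0 ∨ (a.length : Int) < n + 1 ∨ (b.length : Int) < n + 1) ∨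
    ∀ x ∈ PySem.List.slice a (some 1) (some (n + 1)), 0 ≤ x
instance (n : Int) (a : List Int) (b : List Int) : Decidable (Pre_compute3 n a b) := by
  unfold Pre_compute3; infer_instance

def pvWitness_compute3 : Int × List Int × List Int := (2, [0, 2, 3], [0, 5, 4])

def Spec_compute3 (n : Int) (a : List Int) (b : List Int) (out : Int) : Prop := out = compute3_alt n a b
instance (n : Int) (a : List Int) (b : List Int) (out : Int) : Decidable (Spec_compute3 n a b out) := by unfold Spec_compute3; infer_instance

-- ===== CLAIM (what is proved, stated in full; the proofs are below) =====
def Claim_equal_compute3 : Prop := ∀ (n : Int) (a : List Int) (b : List Int), Dom_compute3 n a b → Pre_compute3 n a b → Spec_compute3 n a b (compute3 n a b)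

-- ===== LEMMAS AND PROOFS =====

-- bisimulation invariants between A's ability row and B's cost dict
-- Inv1: every reachable min-cost entry of the row is a key of the dict, whose
--       stored max ability is at least that row index.
def Inv1 (t : Int) (row : List (Option Int)) (d : PySem.Dict Int Int) : Prop :=
  ∀ j c : Int, 0 ≤ j → j ≤ t → PySem.List.pyGetD row j none = some c →
    ∃ v, d.get? c = some v ∧ j ≤ v
-- Inv2: every dict entry (cost c, ability v) is bounded and witnessed by a row
--       entry at index v whose min cost is ≤ c.
def Inv2 (t slack : Int) (row : List (Option Int)) (d : PySem.Dict Int Int) : Prop :=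
  ∀ c v : Int, d.get? c = some v →
    0 ≤ v ∧ v + slack ≤ t ∧ ∃ c', PySem.List.pyGetD row v none = some c' ∧ c' ≤ c

theorem foldl_pyMinInf_acc (l : List (Option Int)) :
    ∀ acc, l.foldl pyMinInf acc = pyMinInf acc (l.foldl pyMinInf none) := by
  induction l with
  | nil => intro acc; cases acc <;> simp [pyMinInf]
  | cons a l ih =>
      intro acc
      simp only [List.foldl_cons]
      rw [ih (pyMinInf acc a), ih (pyMinInf none a)]
      cases acc <;> cases a <;> cases h : l.foldl pyMinInf none <;> simp [pyMinInf, min_assoc]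

theorem foldl_pyMinInf_eq_min? (l : List (Option Int)) :
    l.foldl pyMinInf none = PySem.List.min? (l.filterMap id) (fun x => x) := by
  induction l with
  | nil => rfl
  | cons a l ih =>
    cases a with
    | none => simpa [pyMinInf] using ih
    | some x =>
      simp only [List.foldl_cons, List.filterMap_cons, id]
      rw [foldl_pyMinInf_acc, ih]
      have hid : List.filterMap (fun x : Option Int => x) l = l.filterMap id := rfl
      rw [PySem.List.min?_id_cons]
      cases hfm : l.filterMap id with
      | nil => rw [hid, hfm]; simp [pyMinInf, PySem.List.min?]
      | cons y t =>
          rw [hid, hfm, PySem.List.min?_id_cons]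
          simp only [pyMinInf, List.foldl_cons, Option.some.injEq]
          rw [List.foldl_assoc]

-- access into a row that is a map over range 0..t
theorem pyGetD_map_range (t : Int) (f : Int → Option Int) (j : Int)
    (h0 : 0 ≤ j) (h1 : j ≤ t) :
    PySem.List.pyGetD ((PySem.List.pyRange 0 (t + 1) 1).map f) j none = f j := by
  have hlen : ((PySem.List.pyRange 0 (t + 1) 1).map f).length = (t + 1 - 0).toNat := by
    simp [PySem.List.length_pyRange_one]
  have hj : j.toNat < ((PySem.List.pyRange 0 (t + 1) 1).map f).length := by
    rw [hlen]; omega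
  rw [PySem.List.pyGetD_eq_getElem _ none h0 (by rw [hlen] at hj ⊢; omega)]
  simp only [List.getElem_map, PySem.List.getElem_pyRange_one]
  congr 1
  omega

-- ---- tryMax facts ----
theorem tryMax_nodup (d : PySem.Dict Int Int) (c v : Int) (h : d.keys.Nodup) :
    (tryMax d c v).keys.Nodup := by
  unfold tryMax
  cases hg : d.get? c with
  | none => exact PySem.Dict.nodup_keys_insert d c v h
  | some w =>
      by_cases hlt : w < v
      · simpa [hlt] using PySem.Dict.nodup_keys_insert d c v h
      · simpa [hlt] using h

theorem tryMax_self (d : PySem.Dict Int Int) (c v : Int) :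
    ∃ w, (tryMax d c v).get? c = some w ∧ v ≤ w := by
  unfold tryMax
  cases hg : d.get? c with
  | none => exact ⟨v, PySem.Dict.get?_insert_self d c v, le_refl v⟩
  | some w =>
      by_cases hlt : w < v
      · exact ⟨v, by dsimp only; rw [if_pos hlt]; exact PySem.Dict.get?_insert_self d c v, le_refl v⟩
      · exact ⟨w, by dsimp only; rw [if_neg hlt]; exact hg, by omega⟩

theorem tryMax_mono (d : PySem.Dict Int Int) (c v c' w : Int)
    (h : d.get? c' = some w) : ∃ w', (tryMax d c v).get? c' = some w' ∧ w ≤ w' := by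
  unfold tryMax
  by_cases hc : c' = c
  · subst hc
    rw [h]
    by_cases hlt : w < v
    · exact ⟨v, by simp only [hlt, if_true]; exact PySem.Dict.get?_insert_self d c' v, by omega⟩
    · exact ⟨w, by simpa [hlt] using h, le_refl w⟩
  · cases hg : d.get? c with
    | none => exact ⟨w, by rw [PySem.Dict.get?_insert]; simp [hc, h], le_refl w⟩
    | some w0 =>
        by_cases hlt : w0 < v
        · exact ⟨w, by simp only [hlt, if_true]; rw [PySem.Dict.get?_insert]; simp [hc, h], le_refl w⟩
        · exact ⟨w, by simpa [hlt] using h, le_refl w⟩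

theorem tryMax_src (d : PySem.Dict Int Int) (c v c' w : Int)
    (h : (tryMax d c v).get? c' = some w) :
    (c' = c ∧ w = v) ∨ d.get? c' = some w := by
  unfold tryMax at h
  cases hg : d.get? c with
  | none =>
      rw [hg, PySem.Dict.get?_insert] at h
      by_cases hc : c' = c
      · simp [hc] at h; exact Or.inl ⟨hc, h.symm⟩
      · simp [hc] at h; exact Or.inr h
  | some w0 =>
      rw [hg] at h
      dsimp only at h
      by_cases hlt : w0 < v
      · rw [if_pos hlt, PySem.Dict.get?_insert] at h
        by_cases hc : c' = c
        · simp [hc] at h; exact Or.inl ⟨hc, h.symm⟩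
        · simp [hc] at h; exact Or.inr h
      · rw [if_neg hlt] at h; exact Or.inr h

-- candidate values monster i can put into the next dict from a source entry cv
def Cand (ai bi : Int) (cv : Int × Int) (c w : Int) : Prop :=
  (c = cv.1 ∧ w = cv.2 ∧ ai ≤ cv.2) ∨ (c = cv.1 + bi ∧ w = cv.2 + ai)

-- the inner-loop step function of bStep
def bInner (ai bi : Int) (nxt : PySem.Dict Int Int) (cv : Int × Int) : PySem.Dict Int Int :=
  tryMax (if ai ≤ cv.2 then tryMax nxt cv.1 cv.2 else nxt) (cv.1 + bi) (cv.2 + ai)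

theorem bStep_eq_foldl (ai bi : Int) (best : PySem.Dict Int Int) :
    bStep ai bi best = best.items.foldl (bInner ai bi) PySem.Dict.empty := rfl

theorem bInner_mono (ai bi : Int) (nxt : PySem.Dict Int Int) (cv : Int × Int)
    (c w : Int) (h : nxt.get? c = some w) :
    ∃ w', (bInner ai bi nxt cv).get? c = some w' ∧ w ≤ w' := by
  unfold bInner
  by_cases hc : ai ≤ cv.2
  · rw [if_pos hc]
    obtain ⟨w1, hw1, hle1⟩ := tryMax_mono nxt cv.1 cv.2 c w h
    obtain ⟨w2, hw2, hle2⟩ := tryMax_mono _ (cv.1 + bi) (cv.2 + ai) c w1 hw1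
    exact ⟨w2, hw2, by omega⟩
  · rw [if_neg hc]
    obtain ⟨w2, hw2, hle2⟩ := tryMax_mono nxt (cv.1 + bi) (cv.2 + ai) c w h
    exact ⟨w2, hw2, hle2⟩

theorem bInner_nodup (ai bi : Int) (nxt : PySem.Dict Int Int) (cv : Int × Int)
    (h : nxt.keys.Nodup) : (bInner ai bi nxt cv).keys.Nodup := by
  unfold bInner
  by_cases hc : ai ≤ cv.2
  · rw [if_pos hc]; exact tryMax_nodup _ _ _ (tryMax_nodup _ _ _ h)
  · rw [if_neg hc]; exact tryMax_nodup _ _ _ h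

theorem bInner_src (ai bi : Int) (nxt : PySem.Dict Int Int) (cv : Int × Int)
    (c w : Int) (h : (bInner ai bi nxt cv).get? c = some w) :
    Cand ai bi cv c w ∨ nxt.get? c = some w := by
  unfold bInner at h
  rcases tryMax_src _ _ _ _ _ h with ⟨hc, hw⟩ | h2
  · exact Or.inl (Or.inr ⟨hc, hw⟩)
  · by_cases hcc : ai ≤ cv.2
    · rw [if_pos hcc] at h2
      rcases tryMax_src _ _ _ _ _ h2 with ⟨hc, hw⟩ | h3
      · exact Or.inl (Or.inl ⟨hc, hw, hcc⟩)
      · exact Or.inr h3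
    · rw [if_neg hcc] at h2; exact Or.inr h2

theorem bFold_mono (ai bi : Int) (l : List (Int × Int)) :
    ∀ (nxt : PySem.Dict Int Int) (c w : Int), nxt.get? c = some w →
      ∃ w', (l.foldl (bInner ai bi) nxt).get? c = some w' ∧ w ≤ w' := by
  induction l with
  | nil => intro nxt c w h; exact ⟨w, h, le_refl w⟩
  | cons cv l ih =>
      intro nxt c w h
      obtain ⟨w1, hw1, hle1⟩ := bInner_mono ai bi nxt cv c w h
      obtain ⟨w2, hw2, hle2⟩ := ih _ c w1 hw1
      exact ⟨w2, hw2, by omega⟩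

theorem bFold_nodup (ai bi : Int) (l : List (Int × Int)) :
    ∀ (nxt : PySem.Dict Int Int), nxt.keys.Nodup →
      (l.foldl (bInner ai bi) nxt).keys.Nodup := by
  induction l with
  | nil => intro nxt h; exact h
  | cons cv l ih => intro nxt h; exact ih _ (bInner_nodup ai bi nxt cv h)

theorem bFold_src (ai bi : Int) (l : List (Int × Int)) :
    ∀ (nxt : PySem.Dict Int Int) (c w : Int),
      (l.foldl (bInner ai bi) nxt).get? c = some w →
      (∃ cv ∈ l, Cand ai bi cv c w) ∨ nxt.get? c = some w := by
  induction l with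
  | nil => intro nxt c w h; exact Or.inr h
  | cons cv l ih =>
      intro nxt c w h
      rcases ih _ c w h with ⟨cv', hm, hc⟩ | h2
      · exact Or.inl ⟨cv', by simp [hm], hc⟩
      · rcases bInner_src ai bi nxt cv c w h2 with hc | h3
        · exact Or.inl ⟨cv, by simp, hc⟩
        · exact Or.inr h3

theorem bFold_hit (ai bi : Int) (l : List (Int × Int)) :
    ∀ (nxt : PySem.Dict Int Int) (cv : Int × Int), cv ∈ l →
      (ai ≤ cv.2 → ∃ w, (l.foldl (bInner ai bi) nxt).get? cv.1 = some w ∧ cv.2 ≤ w) ∧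
      (∃ w, (l.foldl (bInner ai bi) nxt).get? (cv.1 + bi) = some w ∧ cv.2 + ai ≤ w) := by
  induction l with
  | nil => intro nxt cv h; exact absurd h (List.not_mem_nil)
  | cons hd l ih =>
      intro nxt cv hm
      rcases List.mem_cons.mp hm with heq | hm'
      · subst heq
        constructor
        · intro hcc
          have h1 : ∃ w, (bInner ai bi nxt cv).get? cv.1 = some w ∧ cv.2 ≤ w := by
            unfold bInner
            rw [if_pos hcc]
            obtain ⟨w1, hw1, hle1⟩ := tryMax_self nxt cv.1 cv.2
            obtain ⟨w2, hw2, hle2⟩ := tryMax_mono _ (cv.1 + bi) (cv.2 + ai) cv.1 w1 hw1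
            exact ⟨w2, hw2, by omega⟩
          obtain ⟨w1, hw1, hle1⟩ := h1
          obtain ⟨w2, hw2, hle2⟩ := bFold_mono ai bi l _ cv.1 w1 hw1
          exact ⟨w2, by simpa using hw2, by omega⟩
        · have h1 : ∃ w, (bInner ai bi nxt cv).get? (cv.1 + bi) = some w ∧ cv.2 + ai ≤ w := by
            unfold bInner
            obtain ⟨w, hw, hle⟩ := tryMax_self (if ai ≤ cv.2 then tryMax nxt cv.1 cv.2 else nxt) (cv.1 + bi) (cv.2 + ai)
            exact ⟨w, hw, hle⟩
          obtain ⟨w1, hw1, hle1⟩ := h1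
          obtain ⟨w2, hw2, hle2⟩ := bFold_mono ai bi l _ (cv.1 + bi) w1 hw1
          exact ⟨w2, by simpa using hw2, by omega⟩
      · exact ih _ cv hm'

-- ---- a3Cell facts ----
theorem cell_src (row : List (Option Int)) (ai bi j c : Int)
    (h : a3Cell row ai bi j = some c) :
    (ai ≤ j ∧ PySem.List.pyGetD row j none = some c) ∨
      (0 ≤ j - ai ∧ ∃ c0, PySem.List.pyGetD row (j - ai) none = some c0 ∧ c = c0 + bi) := by
  unfold a3Cell at h
  dsimp only at h
  by_cases hc1 : j ≥ ai ∧ PySem.List.pyGetD row j none ≠ none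
  · rw [if_pos hc1] at h
    obtain ⟨hj1, hn1⟩ := hc1
    obtain ⟨c1, hg1⟩ := Option.ne_none_iff_exists'.mp hn1
    rw [hg1] at h
    by_cases hc2 : j - ai ≥ 0 ∧ PySem.List.pyGetD row (j - ai) none ≠ none
    · rw [if_pos hc2] at h
      obtain ⟨hj2, hn2⟩ := hc2
      obtain ⟨c2, hg2⟩ := Option.ne_none_iff_exists'.mp hn2
      rw [hg2] at h
      simp only [pyMinInf, Option.map_some, Option.some.injEq] at h
      rcases min_cases c1 (c2 + bi) with ⟨hm, _⟩ | ⟨hm, _⟩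
      · exact Or.inl ⟨hj1, by rw [hg1]; congr 1; omega⟩
      · exact Or.inr ⟨hj2, c2, hg2, by omega⟩
    · rw [if_neg hc2] at h
      simp only [pyMinInf, Option.some.injEq] at h
      exact Or.inl ⟨hj1, by rw [hg1, h]⟩
  · rw [if_neg hc1] at h
    by_cases hc2 : j - ai ≥ 0 ∧ PySem.List.pyGetD row (j - ai) none ≠ none
    · rw [if_pos hc2] at h
      obtain ⟨hj2, hn2⟩ := hc2
      obtain ⟨c2, hg2⟩ := Option.ne_none_iff_exists'.mp hn2
      rw [hg2] at h
      simp only [pyMinInf, Option.map_some, Option.some.injEq] at h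
      exact Or.inr ⟨hj2, c2, hg2, by omega⟩
    · rw [if_neg hc2] at h
      exact absurd h (by simp)

theorem cell_le1 (row : List (Option Int)) (ai bi j c0 : Int)
    (hj : ai ≤ j) (h : PySem.List.pyGetD row j none = some c0) :
    ∃ c', a3Cell row ai bi j = some c' ∧ c' ≤ c0 := by
  unfold a3Cell
  dsimp only
  have hc1 : j ≥ ai ∧ PySem.List.pyGetD row j none ≠ none := ⟨hj, by rw [h]; simp⟩
  rw [if_pos hc1, h]
  by_cases hc2 : j - ai ≥ 0 ∧ PySem.List.pyGetD row (j - ai) none ≠ none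
  · rw [if_pos hc2]
    obtain ⟨hj2, hn2⟩ := hc2
    obtain ⟨c2, hg2⟩ := Option.ne_none_iff_exists'.mp hn2
    rw [hg2]
    exact ⟨min c0 (c2 + bi), rfl, min_le_left _ _⟩
  · rw [if_neg hc2]
    exact ⟨c0, rfl, le_refl c0⟩

theorem cell_le2 (row : List (Option Int)) (ai bi j c0 : Int)
    (hj : 0 ≤ j - ai) (h : PySem.List.pyGetD row (j - ai) none = some c0) :
    ∃ c', a3Cell row ai bi j = some c' ∧ c' ≤ c0 + bi := by
  unfold a3Cell
  dsimp only
  have hc2 : j - ai ≥ 0 ∧ PySem.List.pyGetD row (j - ai) none ≠ none := ⟨hj, by rw [h]; simp⟩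
  by_cases hc1 : j ≥ ai ∧ PySem.List.pyGetD row j none ≠ none
  · rw [if_pos hc1]
    obtain ⟨hj1, hn1⟩ := hc1
    obtain ⟨c1, hg1⟩ := Option.ne_none_iff_exists'.mp hn1
    rw [hg1, if_pos hc2, h]
    exact ⟨min c1 (c0 + bi), rfl, min_le_right _ _⟩
  · rw [if_neg hc1, if_pos hc2, h]
    exact ⟨c0 + bi, rfl, le_refl _⟩

-- ---- one outer step preserves the invariants ----
theorem step_inv (t ai bi slack : Int) (row : List (Option Int)) (d : PySem.Dict Int Int)
    (hnd : d.keys.Nodup) (h1 : Inv1 t row d) (h2 : Inv2 t slack row d)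
    (hai0 : 0 ≤ ai) (hais : ai ≤ slack)
    (hne : ∃ c v, d.get? c = some v) :
    Inv1 t ((PySem.List.pyRange 0 (t + 1) 1).map (a3Cell row ai bi)) (bStep ai bi d) ∧
    Inv2 t (slack - ai) ((PySem.List.pyRange 0 (t + 1) 1).map (a3Cell row ai bi)) (bStep ai bi d) ∧
    (∃ c v, (bStep ai bi d).get? c = some v) ∧ (bStep ai bi d).keys.Nodup := by
  refine ⟨?_, ?_, ?_, ?_⟩
  · -- Inv1
    intro j c hj0 hjt hrow'
    rw [pyGetD_map_range t _ j hj0 hjt] at hrow'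
    rcases cell_src row ai bi j c hrow' with ⟨hja, hg⟩ | ⟨hja, c0, hg, hc⟩
    · obtain ⟨v, hv, hjv⟩ := h1 j c hj0 hjt hg
      have hm : (c, v) ∈ d.items := PySem.Dict.mem_items_of_get?_eq_some d hv
      obtain ⟨w, hw, hvw⟩ := (bFold_hit ai bi d.items PySem.Dict.empty (c, v) hm).1 (by omega)
      exact ⟨w, by rw [bStep_eq_foldl]; exact hw, by omega⟩
    · obtain ⟨v, hv, hjv⟩ := h1 (j - ai) c0 hja (by omega) hg
      have hm : (c0, v) ∈ d.items := PySem.Dict.mem_items_of_get?_eq_some d hv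
      obtain ⟨w, hw, hvw⟩ := (bFold_hit ai bi d.items PySem.Dict.empty (c0, v) hm).2
      exact ⟨w, by rw [bStep_eq_foldl]; subst hc; exact hw, by omega⟩
  · -- Inv2
    intro c w hget
    rw [bStep_eq_foldl] at hget
    rcases bFold_src ai bi d.items PySem.Dict.empty c w hget with ⟨cv, hm, hc⟩ | habs
    · have hg : d.get? cv.1 = some cv.2 := PySem.Dict.get?_of_mem_items d hm hnd
      obtain ⟨hv0, hvs, c0', hgr, hcc⟩ := h2 cv.1 cv.2 hg
      rcases hc with ⟨hceq, hweq, hai⟩ | ⟨hceq, hweq⟩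
      · -- pass without bribing
        refine ⟨by omega, by omega, ?_⟩
        obtain ⟨c'', hcell, hle⟩ := cell_le1 row ai bi cv.2 c0' hai hgr
        refine ⟨c'', ?_, by omega⟩
        rw [hweq, pyGetD_map_range t _ cv.2 hv0 (by omega)]
        exact hcell
      · -- bribe
        refine ⟨by omega, by omega, ?_⟩
        obtain ⟨c'', hcell, hle⟩ := cell_le2 row ai bi (cv.2 + ai) c0' (by omega)
          (by rw [show cv.2 + ai - ai = cv.2 by omega]; exact hgr)
        refine ⟨c'', ?_, by omega⟩
        rw [hweq, pyGetD_map_range t _ (cv.2 + ai) (by omega) (by omega)]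
        exact hcell
    · rw [PySem.Dict.get?_empty] at habs
      exact absurd habs (by simp)
  · -- nonempty
    obtain ⟨c, v, hv⟩ := hne
    have hm : (c, v) ∈ d.items := PySem.Dict.mem_items_of_get?_eq_some d hv
    obtain ⟨w, hw, _⟩ := (bFold_hit ai bi d.items PySem.Dict.empty (c, v) hm).2
    exact ⟨c + bi, w, by rw [bStep_eq_foldl]; exact hw⟩
  · rw [bStep_eq_foldl]
    exact bFold_nodup ai bi d.items PySem.Dict.empty (PySem.Dict.nodup_keys_empty)

-- ---- the whole loop ----
theorem fold_inv (a b : List Int) (t : Int) (L : List Int)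
    (hLa : ∀ i ∈ L, 0 ≤ PySem.List.pyGetD a i 0) :
    ∀ (row : List (Option Int)) (d : PySem.Dict Int Int),
      d.keys.Nodup → Inv1 t row d →
      Inv2 t ((L.map (fun i => PySem.List.pyGetD a i 0)).sum) row d →
      (∃ c v, d.get? c = some v) →
      (L.foldl (fun best i =>
          bStep (PySem.List.pyGetD a i 0) (PySem.List.pyGetD b i 0) best) d).keys.Nodup ∧
      Inv1 t (L.foldl (fun prev i =>
          (PySem.List.pyRange 0 (t + 1) 1).map
            (a3Cell prev (PySem.List.pyGetD a i 0) (PySem.List.pyGetD b i 0))) row)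
        (L.foldl (fun best i =>
          bStep (PySem.List.pyGetD a i 0) (PySem.List.pyGetD b i 0) best) d) ∧
      Inv2 t 0 (L.foldl (fun prev i =>
          (PySem.List.pyRange 0 (t + 1) 1).map
            (a3Cell prev (PySem.List.pyGetD a i 0) (PySem.List.pyGetD b i 0))) row)
        (L.foldl (fun best i =>
          bStep (PySem.List.pyGetD a i 0) (PySem.List.pyGetD b i 0) best) d) ∧
      (∃ c v, (L.foldl (fun best i =>
          bStep (PySem.List.pyGetD a i 0) (PySem.List.pyGetD b i 0) best) d).get? c = some v) := by
  induction L with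
  | nil =>
      intro row d hnd h1 h2 hne
      simp only [List.foldl_nil]
      simp only [List.map_nil, List.sum_nil] at h2
      exact ⟨hnd, h1, h2, hne⟩
  | cons i L ih =>
      intro row d hnd h1 h2 hne
      have hai0 : 0 ≤ PySem.List.pyGetD a i 0 := hLa i (by simp)
      have hrest : 0 ≤ (L.map (fun i => PySem.List.pyGetD a i 0)).sum := by
        apply List.sum_nonneg
        intro x hx
        obtain ⟨i', hi', hx'⟩ := List.mem_map.mp hx
        rw [← hx']
        exact hLa i' (by simp [hi'])
      simp only [List.map_cons, List.sum_cons] at h2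
      obtain ⟨s1, s2, s3, s4⟩ := step_inv t (PySem.List.pyGetD a i 0) (PySem.List.pyGetD b i 0)
        (PySem.List.pyGetD a i 0 + (L.map (fun i => PySem.List.pyGetD a i 0)).sum)
        row d hnd h1 h2 hai0 (by omega) hne
      rw [show PySem.List.pyGetD a i 0 + (L.map (fun i => PySem.List.pyGetD a i 0)).sum
            - PySem.List.pyGetD a i 0 = (L.map (fun i => PySem.List.pyGetD a i 0)).sum
          by omega] at s2
      simp only [List.foldl_cons]
      exact ih (fun i' hi' => hLa i' (by simp [hi'])) _ _ s4 s1 s2 s3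

-- the A-side fold keeps the row at length (t+1).toNat
theorem fold_len (a b : List Int) (t : Int) (L : List Int) :
    ∀ row : List (Option Int), row.length = (t + 1).toNat →
      (L.foldl (fun prev i =>
          (PySem.List.pyRange 0 (t + 1) 1).map
            (a3Cell prev (PySem.List.pyGetD a i 0) (PySem.List.pyGetD b i 0))) row).length
        = (t + 1).toNat := by
  induction L with
  | nil => intro row h; exact h
  | cons i L ih =>
      intro row h
      simp only [List.foldl_cons]
      exact ih _ (by simp [PySem.List.length_pyRange_one])

-- range(1, n+1) mapped through a[...] is the slice a[1:n+1]
theorem map_range_eq_slice (a : List Int) (n : Int) (hn : 0 < n)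
    (hlen : n + 1 ≤ (a.length : Int)) :
    (PySem.List.pyRange 1 (n + 1) 1).map (fun i => PySem.List.pyGetD a i 0) =
      PySem.List.slice a (some 1) (some (n + 1)) := by
  rw [PySem.List.slice_toNat a (by omega : (0:Int) ≤ 1) (by omega : (0:Int) ≤ n + 1)]
  apply List.ext_getElem
  · simp [PySem.List.length_pyRange_one]; omega
  · intro k h1 h2
    simp only [List.getElem_map, PySem.List.getElem_pyRange_one, List.getElem_take,
      List.getElem_drop]
    have hk : k < n.toNat := by
      simpa [PySem.List.length_pyRange_one] using h1
    rw [show (1 : Int) + (k : Int) = ((1 + k : Nat) : Int) by push_cast; ring]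
    rw [PySem.List.pyGetD_natCast]
    rw [List.getD_eq_getElem?_getD, List.getElem?_eq_getElem (by omega)]
    simp

-- ---- from the invariants, the two final answers agree ----
theorem final_eq (t : Int) (row : List (Option Int)) (d : PySem.Dict Int Int)
    (hlen : row.length = (t + 1).toNat) (ht : 0 ≤ t)
    (h1 : Inv1 t row d) (h2 : Inv2 t 0 row d)
    (hne : ∃ c v, d.get? c = some v) :
    PySem.List.min? (row.filterMap id) (fun x => x) =
      PySem.List.min? d.keys (fun x => x) := by
  have memrow : ∀ v c' : Int, 0 ≤ v → v ≤ t → PySem.List.pyGetD row v none = some c' →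
      c' ∈ row.filterMap id := by
    intro v c' hv0 hvt hg
    rw [PySem.List.pyGetD_eq_getElem row none hv0 (by omega)] at hg
    exact List.mem_filterMap.mpr ⟨some c', hg ▸ List.getElem_mem _, rfl⟩
  obtain ⟨c, v, hv⟩ := hne
  obtain ⟨hv0, hvt, c', hgr, hcc⟩ := h2 c v hv
  have hfm : c' ∈ row.filterMap id := memrow v c' hv0 (by omega) hgr
  cases hmq : PySem.List.min? (row.filterMap id) (fun x => x) with
  | none =>
      rw [PySem.List.min?_eq_none_iff] at hmq
      rw [hmq] at hfm
      exact absurd hfm (List.not_mem_nil)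
  | some m =>
      have hmmem : m ∈ row.filterMap id := PySem.List.min?_mem hmq
      have hmmin : ∀ y ∈ row.filterMap id, m ≤ y := PySem.List.min?_isMin hmq
      obtain ⟨o, ho, hom⟩ := List.mem_filterMap.mp hmmem
      have ho' : o = some m := hom
      rw [ho'] at ho
      obtain ⟨k, hk, hrk⟩ := List.mem_iff_getElem.mp ho
      have hkt : (k : Int) ≤ t := by rw [hlen] at hk; omega
      have hrowk : PySem.List.pyGetD row (k : Int) none = some m := by
        rw [PySem.List.pyGetD_eq_getElem row none (by omega) (by omega)]
        simpa using hrk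
      obtain ⟨vm, hvm, _⟩ := h1 (k : Int) m (by omega) hkt hrowk
      have hmk : m ∈ d.keys := by
        by_contra hnm
        rw [← PySem.Dict.get?_eq_none_iff_not_mem_keys] at hnm
        rw [hnm] at hvm
        exact absurd hvm (by simp)
      cases hkq : PySem.List.min? d.keys (fun x => x) with
      | none =>
          rw [PySem.List.min?_eq_none_iff] at hkq
          rw [hkq] at hmk
          exact absurd hmk (List.not_mem_nil)
      | some kmin =>
          have hkmin : ∀ y ∈ d.keys, kmin ≤ y := PySem.List.min?_isMin hkq
          have hle1 : kmin ≤ m := hkmin m hmk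
          have hkmem : kmin ∈ d.keys := PySem.List.min?_mem hkq
          have hvk : d.get? kmin ≠ none := by
            intro hnone
            rw [PySem.Dict.get?_eq_none_iff_not_mem_keys] at hnone
            exact hnone hkmem
          obtain ⟨vk, hvkq⟩ := Option.ne_none_iff_exists'.mp hvk
          obtain ⟨hvk0, hvkt, ck, hgrk, hck⟩ := h2 kmin vk hvkq
          have hckfm : ck ∈ row.filterMap id := memrow vk ck hvk0 (by omega) hgrk
          have hle2 : m ≤ ck := hmmin ck hckfm
          congr 1
          omega

-- ===== VERDICT (by name: the statement is the Claim_ definition above) =====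
theorem compute3_spec : Claim_equal_compute3 := by
  intro n a b _hdom hpre
  unfold Spec_compute3 compute3 compute3_alt
  by_cases hg : (n ≤ 0 ∨ (a.length : Int) < n + 1 ∨ (b.length : Int) < n + 1)
  · rw [if_pos hg, if_pos hg]
  · simp only [hg, if_false]
    have hnn : ∀ x ∈ PySem.List.slice a (some 1) (some (n + 1)), 0 ≤ x := by
      rcases hpre with h | h
      · exact absurd h hg
      · exact h
    set t := (PySem.List.slice a (some 1) (some (n + 1))).sum with hts
    have ht : 0 ≤ t := List.sum_nonneg hnn
    have hlenA : n + 1 ≤ (a.length : Int) := by push_cast at hg ⊢; omega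
    have hn0 : 0 < n := by omega
    have hmap := map_range_eq_slice a n hn0 hlenA
    have hsum : ((PySem.List.pyRange 1 (n + 1) 1).map (fun i => PySem.List.pyGetD a i 0)).sum = t := by
      rw [hmap]
    have hLa : ∀ i ∈ PySem.List.pyRange 1 (n + 1) 1, 0 ≤ PySem.List.pyGetD a i 0 := by
      intro i hi
      apply hnn
      rw [← hmap]
      exact List.mem_map_of_mem hi
    set row0 : List (Option Int) :=
      (PySem.List.pyRange 0 (t + 1) 1).map (fun j => if j = 0 then some 0 else none) with hr0
    set d0 : PySem.Dict Int Int := PySem.Dict.empty.insert 0 0 with hd0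
    have hnd0 : d0.keys.Nodup :=
      PySem.Dict.nodup_keys_insert PySem.Dict.empty 0 0 PySem.Dict.nodup_keys_empty
    have h10 : Inv1 t row0 d0 := by
      intro j c hj0 hjt hget
      rw [hr0, pyGetD_map_range t _ j hj0 hjt] at hget
      by_cases hj : j = 0
      · rw [if_pos hj] at hget
        have hc : c = 0 := by
          injection hget with h
          omega
        subst hc; subst hj
        exact ⟨0, by rw [hd0]; exact PySem.Dict.get?_insert_self PySem.Dict.empty 0 0, le_refl 0⟩
      · rw [if_neg hj] at hget
        exact absurd hget (by simp)
    have h20 : Inv2 t ((PySem.List.pyRange 1 (n + 1) 1).map (fun i => PySem.List.pyGetD a i 0)).sum row0 d0 := by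
      rw [hsum]
      intro c v hget
      rw [hd0, PySem.Dict.get?_insert, PySem.Dict.get?_empty] at hget
      by_cases hc : c = 0
      · rw [if_pos hc] at hget
        have hv : v = 0 := by simpa using hget.symm
        subst hc; subst hv
        refine ⟨le_refl 0, by omega, 0, ?_, le_refl 0⟩
        rw [hr0, pyGetD_map_range t _ 0 (le_refl 0) ht]
        simp
      · rw [if_neg hc] at hget
        exact absurd hget (by simp)
    have hne0 : ∃ c v, d0.get? c = some v :=
      ⟨0, 0, PySem.Dict.get?_insert_self PySem.Dict.empty 0 0⟩
    obtain ⟨fnd, f1, f2, fne⟩ := fold_inv a b t (PySem.List.pyRange 1 (n + 1) 1) hLa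
      row0 d0 hnd0 h10 h20 hne0
    set rowN := (PySem.List.pyRange 1 (n + 1) 1).foldl (fun prev i =>
      (PySem.List.pyRange 0 (t + 1) 1).map
        (a3Cell prev (PySem.List.pyGetD a i 0) (PySem.List.pyGetD b i 0))) row0 with hrN
    set bestN := (PySem.List.pyRange 1 (n + 1) 1).foldl (fun best i =>
      bStep (PySem.List.pyGetD a i 0) (PySem.List.pyGetD b i 0) best) d0 with hbN
    have hlenN : rowN.length = (t + 1).toNat :=
      fold_len a b t _ row0 (by rw [hr0]; simp [PySem.List.length_pyRange_one])
    have hfin := final_eq t rowN bestN hlenN ht f1 f2 fne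
    have hlen' : t + 1 = ((rowN.length : Nat) : Int) := by rw [hlenN]; omega
    rw [hlen']
    rw [PySem.List.foldl_pyRange_zero_pyGetD' rowN none pyMinInf none]
    rw [foldl_pyMinInf_eq_min?, hfin]
    cases PySem.List.min? bestN.keys (fun x => x) <;> rfl
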